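-- pv_equiv track=rewrite | github.com/ay2912/Career_counsellor | career_guidance/app/pages/results.py | format_skills
-- ===== SOURCE A (Python) =====
-- def format_skills(skills_str):
--     """Format skills string into a list of skills"""
--     if not skills_str:
--         return []
--     # Handle both newline and comma separated skills
--     skills = []
--     for skill in skills_str.split('\n'):
--         skill = skill.strip()
--         if skill:
--             if ',' in skill:
--                 skills.extend([s.strip() for s in skill.split(',') if s.strip()])
--             else:
--                 skills.append(skill)
--     return skills
-- ===== SOURCE B (Python) =====
-- def format_skills(skills_str):
--     """Format skills string into a list of skills"""
--     if not skills_str: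
--         return []
--     # Single character-level scan: build each token directly, flushing at ',' or '\n'
--     skills = []
--     cur = []
--     for ch in skills_str + '\n':
--         if ch == ',' or ch == '\n':
--             tok = ''.join(cur).strip()
--             if tok:
--                 skills.append(tok)
--             cur = []
--         else:
--             cur.append(ch)
--     return skills
-- ===== Notes on version B (the rewrite author's own statement) =====
-- stated objective: alternative
-- what changed: Replaces the nested split (newline split, per-line strip, comma-membership branch with an inner comma split) by a single character-level scan that accumulates the current token and flushes it, stripped, at each comma or newline delimiter.
import Mathlib
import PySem

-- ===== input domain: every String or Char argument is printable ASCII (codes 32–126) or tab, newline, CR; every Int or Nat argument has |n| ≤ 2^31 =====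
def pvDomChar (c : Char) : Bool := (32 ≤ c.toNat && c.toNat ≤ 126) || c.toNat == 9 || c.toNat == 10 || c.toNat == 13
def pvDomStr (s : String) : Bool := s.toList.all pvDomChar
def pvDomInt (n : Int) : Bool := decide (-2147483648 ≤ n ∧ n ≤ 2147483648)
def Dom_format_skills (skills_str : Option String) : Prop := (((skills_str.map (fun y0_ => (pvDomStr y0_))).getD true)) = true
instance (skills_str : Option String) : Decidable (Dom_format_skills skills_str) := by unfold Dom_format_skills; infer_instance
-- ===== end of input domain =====

-- B replaces A's nested newline/comma split loop by a single character-level scan that builds each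
-- token directly and flushes it (stripped) at every ',' or '\n' (objective: alternative; same return value).

-- ===== PORT A =====
def format_skills (skills_str : Option String) : List String :=
  match skills_str with
  | none => []
  | some s =>
    if s = "" then []                             -- `if not skills_str` (None or "")
    else
      ((PySem.Str.split? s "\n").getD []).foldl (fun skills skill =>
        let sk := PySem.Str.strip skill
        if sk ≠ "" then
          if PySem.Str.isIn "," sk then
            skills ++ ((((PySem.Str.split? sk ",").getD []).map PySem.Str.strip).filter (fun t => t ≠ ""))
          else skills ++ [sk]
        else skills) []

-- ===== PORT B =====
-- the `for ch in skills_str + '\n'` loop of Source B: state = (remaining chars, cur, skills)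
def altGo : List Char → List Char → List String → List String
  | [], _cur, acc => acc
  | c :: rest, cur, acc =>
    if c = ',' ∨ c = '\n' then
      let tok := PySem.Str.strip (String.ofList cur)      -- ''.join(cur).strip()
      altGo rest [] (if tok ≠ "" then acc ++ [tok] else acc)
    else altGo rest (cur ++ [c]) acc

def format_skills_alt (skills_str : Option String) : List String :=
  match skills_str with
  | none => []
  | some s =>
    if s = "" then []
    else altGo (s.toList ++ ['\n']) [] []

-- ===== PRECONDITION & SPEC =====
def Spec_format_skills (skills_str : Option String) (out : List String) : Prop := out = format_skills_alt skills_str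
instance (skills_str : Option String) (out : List String) : Decidable (Spec_format_skills skills_str out) := by unfold Spec_format_skills; infer_instance

-- ===== CLAIM (what is proved, stated in full; the proofs are below) =====
def Claim_equal_format_skills : Prop := ∀ (skills_str : Option String), Dom_format_skills skills_str → Spec_format_skills skills_str (format_skills skills_str)

-- ===== LEMMAS AND PROOFS =====

-- structural single-character split (proof-side model of Python's s.split(sep) for a 1-char sep)
def splitc (d : Char) : List Char → List (List Char)
  | [] => [[]]
  | c :: t => if c = d then [] :: splitc d t
              else match splitc d t with
                   | [] => [[c]]
                   | p :: ps => (c :: p) :: ps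

def consHead (x : List Char) : List (List Char) → List (List Char)
  | [] => [x]
  | p :: ps => (x ++ p) :: ps

def snocLast (c : Char) : List (List Char) → List (List Char)
  | [] => [[c]]
  | [p] => [p ++ [c]]
  | p :: q :: ps => p :: snocLast c (q :: ps)

theorem splitc_ne_nil (d : Char) (l : List Char) : splitc d l ≠ [] := by
  cases l with
  | nil => simp [splitc]
  | cons c t => simp only [splitc]; split; · simp
                · split <;> simp

theorem consHead_append (x y : List Char) (q : List (List Char)) :
    consHead (x ++ y) q = consHead x (consHead y q) := by
  cases q <;> simp [consHead]

theorem consHead_append_left (x : List Char) (q r : List (List Char)) (hq : q ≠ []) :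
    consHead x (q ++ r) = consHead x q ++ r := by
  cases q with
  | nil => exact absurd rfl hq
  | cons p ps => simp [consHead]

theorem splitc_cons (d c : Char) (t : List Char) :
    splitc d (c :: t) = if c = d then [] :: splitc d t else consHead [c] (splitc d t) := by
  simp only [splitc]; split; · rfl
  · cases h : splitc d t with
    | nil => exact absurd h (splitc_ne_nil d t)
    | cons p ps => simp [consHead]

theorem go_nil (d : Char) (n : Nat) (cur : List Char) (acc : List (List Char)) :
    PySem.Chars.splitOn.go [d] (n+1) [] cur acc = (cur.reverse :: acc).reverse := by
  rw [PySem.Chars.splitOn.go]; omega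

theorem go_cons (d : Char) (n : Nat) (c : Char) (rest cur : List Char) (acc : List (List Char)) :
    PySem.Chars.splitOn.go [d] (n+1) (c :: rest) cur acc
      = if c = d then PySem.Chars.splitOn.go [d] n rest [] (cur.reverse :: acc)
        else PySem.Chars.splitOn.go [d] n rest (c :: cur) acc := by
  rw [PySem.Chars.splitOn.go]
  by_cases hc : c = d
  · simp [List.isPrefixOf, hc]
  · simp [List.isPrefixOf, hc]; intro h; exact absurd h.symm hc

theorem go_spec (d : Char) : ∀ (fuel : Nat) (l cur : List Char) (acc : List (List Char)),
    l.length < fuel →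
    PySem.Chars.splitOn.go [d] fuel l cur acc = acc.reverse ++ consHead cur.reverse (splitc d l) := by
  intro fuel
  induction fuel with
  | zero => intro l cur acc h; omega
  | succ n ih =>
    intro l cur acc h
    cases l with
    | nil => rw [go_nil]; simp [splitc, consHead]
    | cons c rest =>
      rw [go_cons]
      have hlen : rest.length < n := by simpa using Nat.lt_of_succ_lt_succ h
      by_cases hc : c = d
      · rw [if_pos hc, ih _ _ _ hlen, splitc_cons, if_pos hc]
        cases hq : splitc d rest with
        | nil => exact absurd hq (splitc_ne_nil d rest)
        | cons p ps => simp [consHead]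
      · rw [if_neg hc, ih _ _ _ hlen, splitc_cons, if_neg hc]
        simp [consHead_append]

theorem splitOn_singleton (d : Char) (l : List Char) :
    PySem.Chars.splitOn l [d] = splitc d l := by
  unfold PySem.Chars.splitOn
  rw [go_spec d (l.length + 1) l [] [] (by omega)]
  cases h : splitc d l with
  | nil => exact absurd h (splitc_ne_nil d l)
  | cons p ps => simp [consHead]

theorem splitc_map_delim (a b : Char) (l : List Char) :
    splitc b (l.map (fun c => if c = a then b else c))
      = (splitc a l).flatMap (splitc b) := by
  induction l with
  | nil => simp [splitc]
  | cons c t ih =>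
    rw [List.map_cons]
    by_cases hca : c = a
    · simp only [hca, if_true]
      rw [splitc_cons b b, if_pos rfl, splitc_cons a a, if_pos rfl, List.flatMap_cons]
      simp [splitc, ih]
    · simp only [if_neg hca]
      rw [splitc_cons a c, if_neg hca]
      cases hq : splitc a t with
      | nil => exact absurd hq (splitc_ne_nil a t)
      | cons p ps =>
        have ih' : splitc b (List.map (fun c => if c = a then b else c) t)
            = splitc b p ++ List.flatMap (splitc b) ps := by
          rw [ih, hq, List.flatMap_cons]
        by_cases hcb : c = b
        · subst hcb
          rw [splitc_cons c c, if_pos rfl, ih']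
          simp only [consHead, List.flatMap_cons, List.singleton_append]
          rw [splitc_cons c c, if_pos rfl, List.cons_append]
        · rw [splitc_cons b c, if_neg hcb, ih']
          rw [consHead_append_left _ _ _ (splitc_ne_nil b p)]
          simp only [consHead, List.flatMap_cons, List.singleton_append]
          rw [splitc_cons b c, if_neg hcb]
          simp [consHead]

-- strip facts
theorem strip_cons_space {c : Char} (h : PySem.Chars.isspace c = true) (l : List Char) :
    PySem.Chars.strip (c :: l) = PySem.Chars.strip l := by
  simp [PySem.Chars.strip, PySem.Chars.lstrip, h]

theorem rstrip_cons_nonspace {c : Char} (h : ¬ PySem.Chars.isspace c = true) (l : List Char) :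
    PySem.Chars.rstrip (c :: l) = c :: PySem.Chars.rstrip l := by
  simp only [PySem.Chars.rstrip, List.reverse_cons, List.dropWhile_append]
  by_cases he : (List.dropWhile PySem.Chars.isspace l.reverse).isEmpty
  · have h0 : List.dropWhile PySem.Chars.isspace l.reverse = [] := List.isEmpty_iff.mp he
    simp [List.dropWhile, h, h0]
  · simp [he]

theorem rstrip_append_space {c : Char} (h : PySem.Chars.isspace c = true) (l : List Char) :
    PySem.Chars.rstrip (l ++ [c]) = PySem.Chars.rstrip l := by
  simp [PySem.Chars.rstrip, h]

theorem strip_comm (l : List Char) :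
    PySem.Chars.rstrip (PySem.Chars.lstrip l) = PySem.Chars.lstrip (PySem.Chars.rstrip l) := by
  induction l with
  | nil => simp [PySem.Chars.lstrip, PySem.Chars.rstrip]
  | cons c t ih =>
    by_cases h : PySem.Chars.isspace c = true
    · have h1 : PySem.Chars.lstrip (c :: t) = PySem.Chars.lstrip t := by
        simp [PySem.Chars.lstrip, h]
      rw [h1, ih]
      by_cases h2 : PySem.Chars.rstrip t = []
      · rw [h2]
        have h3 : PySem.Chars.rstrip (c :: t) = [] := by
          simp only [PySem.Chars.rstrip, List.reverse_cons, List.dropWhile_append]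
          have : (List.dropWhile PySem.Chars.isspace t.reverse).isEmpty = true := by
            have := congrArg List.reverse h2
            simpa [PySem.Chars.rstrip, List.isEmpty_iff] using this
          simp [this, List.dropWhile, h]
        rw [h3]
      · have h3 : PySem.Chars.rstrip (c :: t) = c :: PySem.Chars.rstrip t := by
          simp only [PySem.Chars.rstrip, List.reverse_cons, List.dropWhile_append]
          have : (List.dropWhile PySem.Chars.isspace t.reverse).isEmpty = false := by
            rw [List.isEmpty_eq_false_iff]
            intro hx; exact h2 (by simp [PySem.Chars.rstrip, hx])
          simp [this]
        rw [h3]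
        cases hr : PySem.Chars.rstrip t with
        | nil => exact absurd hr h2
        | cons a s => simp [PySem.Chars.lstrip, List.dropWhile, h]
    · have h1 : PySem.Chars.lstrip (c :: t) = c :: t := by
        simp [PySem.Chars.lstrip, h]
      rw [h1, rstrip_cons_nonspace h]
      have h2 : PySem.Chars.lstrip (c :: PySem.Chars.rstrip t) = c :: PySem.Chars.rstrip t := by
        simp [PySem.Chars.lstrip, List.dropWhile, h]
      rw [h2]

theorem strip_append_space {c : Char} (h : PySem.Chars.isspace c = true) (l : List Char) :
    PySem.Chars.strip (l ++ [c]) = PySem.Chars.strip l := by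
  show PySem.Chars.rstrip (PySem.Chars.lstrip (l ++ [c])) = _
  rw [strip_comm, rstrip_append_space h, ← strip_comm]
  rfl

theorem strip_all_space {l : List Char} (h : ∀ c ∈ l, PySem.Chars.isspace c = true) :
    PySem.Chars.strip l = [] := by
  have : PySem.Chars.lstrip l = [] := by
    simp [PySem.Chars.lstrip, List.dropWhile_eq_nil_iff]
    exact h
  simp [PySem.Chars.strip, this, PySem.Chars.rstrip]

theorem strip_ne_nil {l : List Char} (h : ¬ ∀ c ∈ l, PySem.Chars.isspace c = true) :
    PySem.Chars.strip l ≠ [] := by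
  push_neg at h
  obtain ⟨c, hc, hcs⟩ := h
  have h1 : PySem.Chars.lstrip l ≠ [] := by
    simp only [PySem.Chars.lstrip, ne_eq, List.dropWhile_eq_nil_iff]
    push_neg
    exact ⟨c, hc, by simpa using hcs⟩
  cases hl : PySem.Chars.lstrip l with
  | nil => exact absurd hl h1
  | cons a s =>
    have ha : ¬ PySem.Chars.isspace a = true := by
      have hh := List.head?_dropWhile_not (p := PySem.Chars.isspace) l
      rw [show List.dropWhile PySem.Chars.isspace l = a :: s from hl] at hh
      simpa using hh
    show PySem.Chars.rstrip (PySem.Chars.lstrip l) ≠ []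
    rw [hl, rstrip_cons_nonspace ha]
    simp

theorem mem_of_mem_strip {c : Char} {l : List Char} (h : c ∈ PySem.Chars.strip l) : c ∈ l := by
  have h1 : ∀ (m : List Char), c ∈ List.dropWhile PySem.Chars.isspace m → c ∈ m := by
    intro m hm; exact (List.dropWhile_sublist _).mem hm
  have h2 : c ∈ PySem.Chars.lstrip l := by
    have : c ∈ PySem.Chars.rstrip (PySem.Chars.lstrip l) := h
    simp only [PySem.Chars.rstrip, List.mem_reverse] at this
    have := h1 _ this
    simpa using this
  exact h1 _ h2

theorem mem_strip_of_mem {c : Char} (hc : ¬ PySem.Chars.isspace c = true) {l : List Char}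
    (h : c ∈ l) : c ∈ PySem.Chars.strip l := by
  have key : ∀ (m : List Char), c ∈ m → c ∈ List.dropWhile PySem.Chars.isspace m := by
    intro m hm
    induction m with
    | nil => simp at hm
    | cons a t ih =>
      by_cases ha : PySem.Chars.isspace a = true
      · rw [List.dropWhile_cons_of_pos ha]
        rcases List.mem_cons.mp hm with h1 | h2
        · exact absurd (h1 ▸ ha) hc
        · exact ih h2
      · rw [List.dropWhile_cons_of_neg ha]; exact hm
  have h2 : c ∈ PySem.Chars.lstrip l := key _ h
  show c ∈ PySem.Chars.rstrip (PySem.Chars.lstrip l)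
  simp only [PySem.Chars.rstrip, List.mem_reverse]
  exact key _ (by simpa using h2)

theorem splitc_of_not_mem {d : Char} {l : List Char} (h : d ∉ l) : splitc d l = [l] := by
  induction l with
  | nil => simp [splitc]
  | cons c t ih =>
    have hcd : ¬ c = d := fun hx => h (by simp [hx])
    rw [splitc_cons, if_neg hcd, ih (fun hx => h (by simp [hx]))]
    simp [consHead]

theorem splitc_subset {d : Char} {l p : List Char} (hp : p ∈ splitc d l)
    {c : Char} (hc : c ∈ p) : c ∈ l := by
  induction l generalizing p with
  | nil => simp [splitc] at hp; subst hp; simp at hc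
  | cons a t ih =>
    rw [splitc_cons] at hp
    by_cases ha : a = d
    · rw [if_pos ha] at hp
      rcases List.mem_cons.mp hp with h1 | h2
      · subst h1; simp at hc
      · exact List.mem_cons_of_mem _ (ih h2 hc)
    · rw [if_neg ha] at hp
      cases hq : splitc d t with
      | nil => exact absurd hq (splitc_ne_nil d t)
      | cons q qs =>
        rw [hq] at hp
        simp only [consHead, List.singleton_append] at hp
        rcases List.mem_cons.mp hp with h1 | h2
        · subst h1
          rcases List.mem_cons.mp hc with h3 | h4
          · simp [h3]
          · exact List.mem_cons_of_mem _ (ih (hq ▸ List.mem_cons_self) h4)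
        · exact List.mem_cons_of_mem _ (ih (hq ▸ List.mem_cons_of_mem _ h2) hc)

theorem isIn_singleton (c : Char) (l : List Char) :
    PySem.Chars.isIn [c] l = true ↔ c ∈ l := by
  rw [PySem.Chars.isIn_iff_infix]
  constructor
  · intro h; exact (List.infix_iff_prefix_suffix.mp h).elim
      (fun t ⟨ht, hs⟩ => by
        have := ht.sublist.trans hs.sublist
        exact (List.singleton_sublist.mp this))
  · intro h
    obtain ⟨l₁, l₂, rfl⟩ := List.append_of_mem h
    exact ⟨l₁, l₂, by simp⟩

theorem map_strip_snocLast {c : Char} (h : PySem.Chars.isspace c = true) :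
    ∀ (xs : List (List Char)), xs ≠ [] →
    (snocLast c xs).map PySem.Chars.strip = xs.map PySem.Chars.strip := by
  intro xs
  induction xs with
  | nil => intro hx; exact absurd rfl hx
  | cons p ps ih =>
    intro _
    cases ps with
    | nil => simp [snocLast, strip_append_space h]
    | cons q qs =>
      have := ih (by simp)
      simp only [snocLast, List.map_cons] at this ⊢
      rw [this]

theorem splitc_snoc {d c : Char} (h : ¬ c = d) (l : List Char) :
    splitc d (l ++ [c]) = snocLast c (splitc d l) := by
  induction l with
  | nil => simp [splitc, h, snocLast]
  | cons a t ih =>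
    rw [List.cons_append, splitc_cons, splitc_cons d a t]
    by_cases ha : a = d
    · rw [if_pos ha, if_pos ha, ih]
      cases hq : splitc d t with
      | nil => exact absurd hq (splitc_ne_nil d t)
      | cons q qs => cases qs <;> simp [snocLast]
    · rw [if_neg ha, if_neg ha]
      cases hq : splitc d t with
      | nil => exact absurd hq (splitc_ne_nil d t)
      | cons q qs =>
        rw [ih, hq]
        cases qs with
        | nil => simp [snocLast, consHead]
        | cons r rs =>
          cases rs <;> simp [snocLast, consHead]

theorem map_strip_splitc_lstrip {d : Char} (hd : ¬ PySem.Chars.isspace d = true) (l : List Char) :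
    (splitc d (PySem.Chars.lstrip l)).map PySem.Chars.strip
      = (splitc d l).map PySem.Chars.strip := by
  induction l with
  | nil => simp [PySem.Chars.lstrip]
  | cons c t ih =>
    by_cases hc : PySem.Chars.isspace c = true
    · have hl : PySem.Chars.lstrip (c :: t) = PySem.Chars.lstrip t := by
        simp [PySem.Chars.lstrip, hc]
      have hcd : ¬ c = d := fun hx => hd (hx ▸ hc)
      rw [hl, ih, splitc_cons, if_neg hcd]
      cases hq : splitc d t with
      | nil => exact absurd hq (splitc_ne_nil d t)
      | cons q qs =>
        simp only [consHead, List.singleton_append, List.map_cons]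
        rw [strip_cons_space hc]
    · have hl : PySem.Chars.lstrip (c :: t) = c :: t := by
        simp [PySem.Chars.lstrip, hc]
      rw [hl]

theorem map_strip_splitc_append_space {d : Char} (hd : ¬ PySem.Chars.isspace d = true)
    (m ws : List Char) (hws : ∀ c ∈ ws, PySem.Chars.isspace c = true) :
    (splitc d (m ++ ws)).map PySem.Chars.strip = (splitc d m).map PySem.Chars.strip := by
  induction ws using List.reverseRecOn generalizing m with
  | nil => simp
  | append_singleton ws' c ih =>
    have hc : PySem.Chars.isspace c = true := hws c (by simp)
    have hcd : ¬ c = d := fun hx => hd (hx ▸ hc)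
    rw [show m ++ (ws' ++ [c]) = (m ++ ws') ++ [c] by simp, splitc_snoc hcd,
        map_strip_snocLast hc _ (splitc_ne_nil d (m ++ ws'))]
    exact ih m (fun x hx => hws x (by simp [hx]))

theorem map_strip_splitc_rstrip {d : Char} (hd : ¬ PySem.Chars.isspace d = true) (l : List Char) :
    (splitc d (PySem.Chars.rstrip l)).map PySem.Chars.strip
      = (splitc d l).map PySem.Chars.strip := by
  have hdecomp : l = PySem.Chars.rstrip l ++ (List.takeWhile PySem.Chars.isspace l.reverse).reverse := by
    show l = (List.dropWhile PySem.Chars.isspace l.reverse).reverse ++ _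
    calc l = l.reverse.reverse := (List.reverse_reverse l).symm
      _ = (List.takeWhile PySem.Chars.isspace l.reverse
            ++ List.dropWhile PySem.Chars.isspace l.reverse).reverse := by
            rw [List.takeWhile_append_dropWhile]
      _ = (List.dropWhile PySem.Chars.isspace l.reverse).reverse
            ++ (List.takeWhile PySem.Chars.isspace l.reverse).reverse := by
            rw [List.reverse_append]
  conv_rhs => rw [hdecomp]
  rw [map_strip_splitc_append_space hd]
  intro c hc
  exact List.mem_takeWhile_imp (by simpa using hc)

theorem map_strip_splitc_strip {d : Char} (hd : ¬ PySem.Chars.isspace d = true) (l : List Char) :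
    (splitc d (PySem.Chars.strip l)).map PySem.Chars.strip
      = (splitc d l).map PySem.Chars.strip := by
  show (splitc d (PySem.Chars.rstrip (PySem.Chars.lstrip l))).map PySem.Chars.strip = _
  rw [map_strip_splitc_rstrip hd, map_strip_splitc_lstrip hd]

-- the per-line contribution of A's loop body
def gC (line : List Char) : List (List Char) :=
  let sk := PySem.Chars.strip line
  if sk ≠ [] then
    if PySem.Chars.isIn [','] sk then
      ((splitc ',' sk).map PySem.Chars.strip).filter (fun t => t ≠ [])
    else [sk]
  else []

theorem gC_eq (line : List Char) :
    gC line = ((splitc ',' line).map PySem.Chars.strip).filter (fun t => t ≠ []) := by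
  unfold gC
  by_cases hall : ∀ c ∈ line, PySem.Chars.isspace c = true
  · rw [if_neg (by simpa using strip_all_space hall)]
    have : ∀ p ∈ (splitc ',' line).map PySem.Chars.strip, p = [] := by
      intro p hp
      obtain ⟨q, hq, rfl⟩ := List.mem_map.mp hp
      exact strip_all_space (fun c hc => hall c (splitc_subset hq hc))
    rw [List.filter_eq_nil_iff.mpr (fun a ha => by simpa using this a ha)]
  · have hsk : PySem.Chars.strip line ≠ [] := strip_ne_nil hall
    rw [if_pos hsk]
    have hcomma : ¬ PySem.Chars.isspace ',' = true := by decide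
    by_cases hmem : ',' ∈ line
    · rw [if_pos ((isIn_singleton _ _).mpr (mem_strip_of_mem hcomma hmem))]
      rw [map_strip_splitc_strip hcomma]
    · have : ¬ PySem.Chars.isIn [','] (PySem.Chars.strip line) = true := by
        rw [isIn_singleton]
        exact fun hx => hmem (mem_of_mem_strip hx)
      rw [if_neg this, splitc_of_not_mem hmem]
      simp [hsk]

-- the core equality, on char lists
theorem core (cs : List Char) :
    (splitc '\n' cs).flatMap gC
      = ((splitc ',' (cs.map (fun c => if c = '\n' then ',' else c))).map PySem.Chars.strip).filter
          (fun t => t ≠ []) := by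
  rw [splitc_map_delim '\n' ',' cs, List.map_flatMap, List.filter_flatMap]
  exact (List.flatMap_congr (fun line _ => gC_eq line)).symm ▸ rfl

-- String-level glue
theorem ofList_inj {x y : List Char} (h : String.ofList x = String.ofList y) : x = y := by
  have := congrArg String.toList h
  simpa using this

theorem filter_ofList (xs : List (List Char)) :
    (xs.map String.ofList).filter (fun t => t ≠ "")
      = (xs.filter (fun t => t ≠ [])).map String.ofList := by
  induction xs with
  | nil => simp
  | cons p ps ih =>
    simp only [ne_eq, decide_not, List.map_cons, List.filter_cons] at ih ⊢
    by_cases hp : p = []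
    · have h0 : (String.ofList p = "") := by rw [hp]
      simp [hp, ih]
    · have h0 : ¬ (String.ofList p = "") := fun h => hp (ofList_inj (by rw [h]))
      simp [h0, hp, ih]

theorem str_split_single (s : String) (d : Char) (sep : String) (hsep : sep.toList = [d]) :
    PySem.Str.split? s sep = some ((splitc d s.toList).map String.ofList) := by
  have h1 := PySem.Str.split?_map s sep
  rw [hsep] at h1
  have h2 : PySem.Chars.split? s.toList [d] = some (splitc d s.toList) := by
    simp [PySem.Chars.split?, splitOn_singleton]
  rw [h2] at h1
  cases hx : PySem.Str.split? s sep with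
  | none => rw [hx] at h1; simp at h1
  | some xs =>
    rw [hx] at h1
    simp only [Option.map_some, Option.some.injEq] at h1
    congr 1
    have : xs = (xs.map String.toList).map String.ofList := by
      simp [List.map_map, Function.comp_def, String.ofList_toList]
    rw [this, h1]

theorem str_strip_ofList (x : List Char) :
    PySem.Str.strip (String.ofList x) = String.ofList (PySem.Chars.strip x) := by
  have := PySem.Str.toList_strip (String.ofList x)
  rw [String.toList_ofList] at this
  calc PySem.Str.strip (String.ofList x)
      = String.ofList ((PySem.Str.strip (String.ofList x)).toList) := by rw [String.ofList_toList]
    _ = String.ofList (PySem.Chars.strip x) := by rw [this]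

-- token-list post-processing shared by both characterizations
def fTok (xs : List (List Char)) : List String :=
  ((xs.map PySem.Chars.strip).filter (fun t => t ≠ [])).map String.ofList

theorem fTok_cons (p : List Char) (ps : List (List Char)) :
    fTok (p :: ps) = fTok [p] ++ fTok ps := by
  simp [fTok, List.filter_cons]
  split <;> simp

theorem flush_eq (cur : List Char) :
    (if PySem.Str.strip (String.ofList cur) ≠ "" then [PySem.Str.strip (String.ofList cur)] else [])
      = fTok [cur] := by
  rw [str_strip_ofList]
  by_cases h : PySem.Chars.strip cur = []
  · rw [if_neg (by simp [h])]
    simp [fTok, h]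
  · have hne : String.ofList (PySem.Chars.strip cur) ≠ "" := by
      intro hx; exact h (ofList_inj (by rw [hx]))
    rw [if_pos hne]
    simp [fTok, h]

-- B characterization: the scanner computes strip-and-filter over the both-delimiter split
theorem altGo_spec : ∀ (l cur : List Char) (acc : List String),
    altGo (l ++ ['\n']) cur acc
      = acc ++ fTok (consHead cur (splitc ',' (l.map (fun c => if c = '\n' then ',' else c)))) := by
  intro l
  induction l with
  | nil =>
    intro cur acc
    show altGo ['\n'] cur acc = _
    rw [altGo]
    rw [if_pos (Or.inr rfl)]
    show (if PySem.Str.strip (String.ofList cur) ≠ "" then acc ++ [PySem.Str.strip (String.ofList cur)] else acc)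
        = _
    have : (if PySem.Str.strip (String.ofList cur) ≠ "" then acc ++ [PySem.Str.strip (String.ofList cur)] else acc)
        = acc ++ (if PySem.Str.strip (String.ofList cur) ≠ "" then [PySem.Str.strip (String.ofList cur)] else []) := by
      split <;> simp
    rw [this, flush_eq]
    simp [splitc, consHead]
  | cons c t ih =>
    intro cur acc
    rw [List.cons_append, altGo]
    by_cases hd : c = ',' ∨ c = '\n'
    · rw [if_pos hd]
      have hrepl : (if c = '\n' then ',' else c) = ',' := by
        rcases hd with h | h <;> simp [h]
      rw [List.map_cons, hrepl, splitc_cons, if_pos rfl]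
      show altGo (t ++ ['\n']) [] (if PySem.Str.strip (String.ofList cur) ≠ "" then acc ++ [PySem.Str.strip (String.ofList cur)] else acc) = _
      rw [ih]
      have hflush : (if PySem.Str.strip (String.ofList cur) ≠ "" then acc ++ [PySem.Str.strip (String.ofList cur)] else acc)
          = acc ++ fTok [cur] := by
        rw [← flush_eq]; split <;> simp
      rw [hflush]
      cases hq : splitc ',' (t.map (fun c => if c = '\n' then ',' else c)) with
      | nil => exact absurd hq (splitc_ne_nil _ _)
      | cons p ps =>
        simp only [consHead, List.nil_append, List.append_assoc]
        rw [List.append_nil, fTok_cons cur (p :: ps)]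
    · rw [if_neg hd]
      have hc1 : ¬ c = '\n' := fun h => hd (Or.inr h)
      have hc2 : ¬ c = ',' := fun h => hd (Or.inl h)
      rw [List.map_cons, if_neg hc1, splitc_cons, if_neg hc2, ih]
      rw [← consHead_append]

-- ===== VERDICT (by name: the statement is the Claim_ definition above) =====
theorem format_skills_spec : Claim_equal_format_skills := by
  intro skills_str _
  unfold Spec_format_skills format_skills format_skills_alt
  cases skills_str with
  | none => rfl
  | some s =>
    by_cases hs : s = ""
    · simp [hs]
    · simp only [if_neg hs]
      have hnl : ("\n" : String).toList = ['\n'] := by decide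
      have hcm : ("," : String).toList = [','] := by decide
      -- B side: the scanner result
      rw [altGo_spec]
      have hB : consHead [] (splitc ',' (s.toList.map (fun c => if c = '\n' then ',' else c)))
          = splitc ',' (s.toList.map (fun c => if c = '\n' then ',' else c)) := by
        cases hq : splitc ',' (s.toList.map (fun c => if c = '\n' then ',' else c)) with
        | nil => exact absurd hq (splitc_ne_nil _ _)
        | cons p ps => simp [consHead]
      rw [hB, List.nil_append]
      -- A side
      rw [str_split_single s '\n' "\n" hnl]
      simp only [Option.getD_some]
      -- the loop body appends a per-line block
      have hbody : ∀ (acc : List String) (skill : String),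
          (let sk := PySem.Str.strip skill
           if sk ≠ "" then
             if PySem.Str.isIn "," sk then
               acc ++ ((((PySem.Str.split? sk ",").getD []).map PySem.Str.strip).filter (fun t => t ≠ ""))
             else acc ++ [sk]
           else acc)
          = acc ++ ((gC skill.toList).map String.ofList) := by
        intro acc skill
        simp only []
        by_cases h1 : PySem.Str.strip skill ≠ ""
        · rw [if_pos h1]
          have hskl : (PySem.Str.strip skill).toList = PySem.Chars.strip skill.toList :=
            PySem.Str.toList_strip skill
          have h1' : PySem.Chars.strip skill.toList ≠ [] := by
            intro hx
            apply h1
            rw [← String.ofList_toList (s := PySem.Str.strip skill), hskl, hx]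
          by_cases h2 : PySem.Str.isIn "," (PySem.Str.strip skill) = true
          · rw [if_pos h2]
            have h2' : PySem.Chars.isIn [','] (PySem.Chars.strip skill.toList) = true := by
              have := PySem.Str.isIn_eq "," (PySem.Str.strip skill)
              rw [hcm, hskl] at this
              rw [← this]; exact h2
            have hsplit2 : PySem.Str.split? (PySem.Str.strip skill) ","
                = some ((splitc ',' (PySem.Chars.strip skill.toList)).map String.ofList) := by
              rw [str_split_single _ ',' _ hcm, hskl]
            rw [hsplit2]
            simp only [Option.getD_some]
            unfold gC
            simp only [if_pos h1', if_pos h2']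
            congr 1
            rw [List.map_map]
            have : (PySem.Str.strip ∘ String.ofList) = (String.ofList ∘ PySem.Chars.strip) := by
              funext x; exact str_strip_ofList x
            rw [this, ← List.map_map, filter_ofList]
          · rw [if_neg h2]
            unfold gC
            have h2' : ¬ PySem.Chars.isIn [','] (PySem.Chars.strip skill.toList) = true := by
              have := PySem.Str.isIn_eq "," (PySem.Str.strip skill)
              rw [hcm, hskl] at this
              rw [← this]; exact h2
            simp only [if_pos h1', if_neg h2']
            have hrw : PySem.Str.strip skill = String.ofList (PySem.Chars.strip skill.toList) := by
              rw [← hskl, String.ofList_toList]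
            rw [hrw]
            simp
        · rw [if_neg h1]
          unfold gC
          have h1' : ¬ PySem.Chars.strip skill.toList ≠ [] := by
            simp only [ne_eq, not_not] at h1 ⊢
            have := congrArg String.toList h1
            rw [PySem.Str.toList_strip] at this
            simpa using this
          simp [if_neg h1']
      have hfold : ∀ (init : List String) (ls : List String),
          ls.foldl (fun skills skill =>
            let sk := PySem.Str.strip skill
            if sk ≠ "" then
              if PySem.Str.isIn "," sk then
                skills ++ ((((PySem.Str.split? sk ",").getD []).map PySem.Str.strip).filter (fun t => t ≠ ""))
              else skills ++ [sk]
            else skills) init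
          = init ++ ls.flatMap (fun skill => (gC skill.toList).map String.ofList) := by
        intro init ls
        induction ls generalizing init with
        | nil => simp
        | cons x xs ih =>
          rw [List.foldl_cons, List.flatMap_cons, hbody init x, ih, List.append_assoc]
      rw [hfold]
      simp only [List.nil_append]
      rw [List.flatMap_map]
      have hcollapse : (fun a => List.map String.ofList (gC (String.ofList a).toList))
          = (fun a => List.map String.ofList (gC a)) := by
        funext a; rw [String.toList_ofList]
      rw [hcollapse, ← List.map_flatMap, core s.toList]
      rfl
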